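-- pv_equiv track=rewrite | github.com/ojones/abc_code_test | app.py | choose_criteria
-- ===== SOURCE A (Python) =====
-- def choose_criteria(keywords, answered_words):
--         criteria = ''
--         keyword_idx = 0
--         ordered_count = 0
--         unordered_count = 0
--         for word in answered_words:
--             if keyword_idx < len(keywords) and keywords[keyword_idx] == word:
--                 ordered_count += 1
--                 keyword_idx += 1
--             if word in keywords:
--                 unordered_count += 1
--         if ordered_count == len(keywords):
--             criteria = 'criteria-1'
--         elif unordered_count > 1:
--             criteria = 'criteria-2'
--         elif len(answered_words):
--             criteria = 'criteria-3'
--         else: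
--             criteria = 'criteria-4'
--         return criteria
-- ===== SOURCE B (Python) =====
-- def choose_criteria(keywords, answered_words):
--     # Inverted index: word -> sorted list of its positions in answered_words.
--     positions = {}
--     for i, w in enumerate(answered_words):
--         positions.setdefault(w, []).append(i)
--
--     # keywords is an in-order match iff each keyword has an occurrence at or
--     # after the previous match; found by binary search in its position list.
--     ordered = True
--     p = 0
--     for k in keywords:
--         occ = positions.get(k, [])
--         lo, hi = 0, len(occ)
--         while lo < hi:
--             mid = (lo + hi) // 2
--             if occ[mid] < p:
--                 lo = mid + 1
--             else:
--                 hi = mid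
--         if lo == len(occ):
--             ordered = False
--             break
--         p = occ[lo] + 1
--
--     if ordered:
--         return 'criteria-1'
--     kwset = set(keywords)
--     count = sum(w in kwset for w in answered_words)
--     if count > 1:
--         return 'criteria-2'
--     if answered_words:
--         return 'criteria-3'
--     return 'criteria-4'
-- ===== Notes on version B (the rewrite author's own statement) =====
-- stated objective: faster
-- what changed: Replaces A's single interleaved scan (index pointer into keywords plus a per-word linear membership scan of keywords) by an inverted index built once (word -> sorted position list), with the in-order test done by walking keywords and binary-searching each keyword's position list, and the membership count done against a set of keywords.
import Mathlib
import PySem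

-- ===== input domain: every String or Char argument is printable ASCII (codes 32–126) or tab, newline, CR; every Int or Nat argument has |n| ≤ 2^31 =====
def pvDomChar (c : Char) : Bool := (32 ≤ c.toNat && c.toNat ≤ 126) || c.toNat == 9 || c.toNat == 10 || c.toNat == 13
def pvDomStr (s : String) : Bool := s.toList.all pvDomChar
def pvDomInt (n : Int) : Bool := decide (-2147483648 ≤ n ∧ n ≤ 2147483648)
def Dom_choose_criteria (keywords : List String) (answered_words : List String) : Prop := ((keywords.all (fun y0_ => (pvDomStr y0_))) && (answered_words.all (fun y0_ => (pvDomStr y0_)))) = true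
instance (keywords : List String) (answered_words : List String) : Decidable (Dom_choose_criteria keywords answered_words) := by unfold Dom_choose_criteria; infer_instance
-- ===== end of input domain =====

-- B replaces A's single O(n*m) interleaved scan by an inverted index (word -> sorted
-- position list) queried with binary search for the in-order test, plus a set-based
-- membership count; objective: faster (better asymptotics).


-- ===== PORT A =====
-- one loop over answered_words keeping (keyword_idx, ordered_count, unordered_count)
def pvStepA (keywords : List String) (s : Nat × Nat × Nat) (word : String) : Nat × Nat × Nat :=
  let s1 := if s.1 < keywords.length ∧ keywords.getD s.1 "" = word
            then (s.1 + 1, s.2.1 + 1, s.2.2) else s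
  if word ∈ keywords then (s1.1, s1.2.1, s1.2.2 + 1) else s1

-- the final if/elif/elif/else classification over the loop's final state
def pvClassifyA (keywords : List String) (answered_words : List String) (s : Nat × Nat × Nat) : String :=
  if s.2.1 = keywords.length then "criteria-1"
  else if 1 < s.2.2 then "criteria-2"
  else if answered_words.length ≠ 0 then "criteria-3"
  else "criteria-4"

def choose_criteria (keywords : List String) (answered_words : List String) : String :=
  pvClassifyA keywords answered_words (answered_words.foldl (pvStepA keywords) (0, 0, 0))

-- ===== PORT B =====
-- `for i, w in enumerate(answered_words): positions.setdefault(w, []).append(i)`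
-- (setdefault+append = one insert of the extended list, position kept / new key appended)
def pvBuild (i : Int) : List String → PySem.Dict String (List Int) → PySem.Dict String (List Int)
  | [], d => d
  | w :: ws, d => pvBuild (i + 1) ws (d.insert w (d.getD w [] ++ [i]))

def pvPositions (ws : List String) : PySem.Dict String (List Int) :=
  pvBuild 0 ws PySem.Dict.empty

-- the hand-written `while lo < hi: mid = (lo+hi)//2; …` binary search of Source B
def pvLowerBound (occ : List Int) (p : Int) (lo hi : Nat) : Nat :=
  if _h : lo < hi then
    let mid := (lo + hi) / 2
    if occ.getD mid 0 < p then pvLowerBound occ p (mid + 1) hi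
    else pvLowerBound occ p lo mid
  else lo
termination_by hi - lo
decreasing_by all_goals omega

-- the `for k in keywords` loop carrying p (next admissible position)
def pvOrderedB (d : PySem.Dict String (List Int)) : List String → Int → Bool
  | [], _ => true
  | k :: ks, p =>
    let occ := d.getD k []
    let lo := pvLowerBound occ p 0 occ.length
    if lo = occ.length then false
    else pvOrderedB d ks (occ.getD lo 0 + 1)

def choose_criteria_alt (keywords : List String) (answered_words : List String) : String :=
  let positions := pvPositions answered_words
  if pvOrderedB positions keywords 0 then "criteria-1"
  else
    let kwset := PySem.Set.ofList keywords
    if 1 < answered_words.countP (fun w => PySem.Set.contains kwset w) then "criteria-2"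
    else if answered_words ≠ [] then "criteria-3"
    else "criteria-4"

-- ===== PRECONDITION & SPEC =====
def Spec_choose_criteria (keywords : List String) (answered_words : List String) (out : String) : Prop := out = choose_criteria_alt keywords answered_words
instance (keywords : List String) (answered_words : List String) (out : String) : Decidable (Spec_choose_criteria keywords answered_words out) := by unfold Spec_choose_criteria; infer_instance

-- ===== CLAIM (what is proved, stated in full; the proofs are below) =====
def Claim_equal_choose_criteria : Prop := ∀ (keywords : List String) (answered_words : List String), Dom_choose_criteria keywords answered_words → Spec_choose_criteria keywords answered_words (choose_criteria keywords answered_words)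

-- ===== LEMMAS AND PROOFS =====

-- reference function: consume words until k is found (`k in it` on an iterator)
def pvConsume (k : String) : List String → Option (List String)
  | [] => none
  | w :: ws => if w = k then some ws else pvConsume k ws

-- reference function: greedy in-order match (exactly what A's keyword_idx walk does)
def pvOrderedAll : List String → List String → Bool
  | [], _ => true
  | k :: ks, ws =>
    match pvConsume k ws with
    | none => false
    | some ws' => pvOrderedAll ks ws'

-- positions (starting offset n) of the occurrences of k in a word list
def occFrom (k : String) : Nat → List String → List Nat
  | _, [] => []
  | n, w :: ws => if w = k then n :: occFrom k (n + 1) ws else occFrom k (n + 1) ws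

lemma pvBuild_getD (k : String) :
    ∀ (ws : List String) (i : Nat) (d : PySem.Dict String (List Int)),
      (pvBuild (i : Int) ws d).getD k [] =
        d.getD k [] ++ (occFrom k i ws).map Int.ofNat := by
  intro ws
  induction ws with
  | nil => intro i d; simp [pvBuild, occFrom]
  | cons w ws ih =>
    intro i d
    show (pvBuild ((i : Int) + 1) ws (d.insert w (d.getD w [] ++ [(i : Int)]))).getD k [] = _
    have : ((i : Int) + 1) = ((i + 1 : Nat) : Int) := by push_cast; ring
    rw [this, ih (i + 1)]
    by_cases hkw : k = w
    · subst hkw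
      rw [PySem.Dict.getD_insert_self]
      simp [occFrom]
    · rw [PySem.Dict.getD_insert, if_neg hkw]
      simp [occFrom, Ne.symm hkw]

lemma occFrom_bounds (k : String) :
    ∀ (ws : List String) (n : Nat) (j : Nat), j ∈ occFrom k n ws → n ≤ j ∧ j < n + ws.length := by
  intro ws
  induction ws with
  | nil => intro n j h; simp [occFrom] at h
  | cons w ws ih =>
    intro n j h
    simp only [occFrom] at h
    by_cases hw : w = k
    · rw [if_pos hw] at h
      rcases List.mem_cons.mp h with h | h
      · subst h; simp
      · have := ih (n + 1) j h; constructor <;> [omega; (simp; omega)]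
    · rw [if_neg hw] at h
      have := ih (n + 1) j h; constructor <;> [omega; (simp; omega)]

lemma occFrom_append (k : String) :
    ∀ (xs ys : List String) (n : Nat),
      occFrom k n (xs ++ ys) = occFrom k n xs ++ occFrom k (n + xs.length) ys := by
  intro xs
  induction xs with
  | nil => intro ys n; simp [occFrom]
  | cons x xs ih =>
    intro ys n
    simp only [List.cons_append, occFrom, ih, List.length_cons]
    by_cases hx : x = k
    · rw [if_pos hx, if_pos hx]; simp; ring_nf
    · rw [if_neg hx, if_neg hx]; ring_nf

lemma pvConsume_occFrom (k : String) :
    ∀ (vs : List String) (n : Nat),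
      (occFrom k n vs = [] → pvConsume k vs = none) ∧
      (∀ j t, occFrom k n vs = j :: t →
        n ≤ j ∧ pvConsume k vs = some (vs.drop (j + 1 - n))) := by
  intro vs
  induction vs with
  | nil => intro n; exact ⟨fun _ => rfl, fun j t h => by simp [occFrom] at h⟩
  | cons w ws ih =>
    intro n
    by_cases hw : w = k
    · constructor
      · intro h; simp [occFrom, hw] at h
      · intro j t h
        simp only [occFrom, if_pos hw] at h
        injection h with h1 h2
        subst h1
        refine ⟨le_refl _, ?_⟩
        have : n + 1 - n = 1 := by omega
        simp [pvConsume, hw, this]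
    · have h1 : occFrom k n (w :: ws) = occFrom k (n + 1) ws := by simp [occFrom, hw]
      have h2 : pvConsume k (w :: ws) = pvConsume k ws := by simp [pvConsume, hw]
      rw [h1, h2]
      constructor
      · exact (ih (n + 1)).1
      · intro j t h
        obtain ⟨hle, hc⟩ := (ih (n + 1)).2 j t h
        refine ⟨by omega, ?_⟩
        have he : j + 1 - (n + 1) = j - n := by omega
        rw [he] at hc
        rw [hc]
        have : j + 1 - n = (j - n) + 1 := by omega
        rw [this, List.drop_succ_cons]

lemma pvLowerBound_spec (occ : List Int) (p : Int)
    (hmono : ∀ a b, a ≤ b → b < occ.length → occ.getD a 0 ≤ occ.getD b 0) :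
    ∀ fuel lo hi, hi - lo ≤ fuel → lo ≤ hi → hi ≤ occ.length →
      (∀ j, j < lo → occ.getD j 0 < p) →
      (∀ j, hi ≤ j → j < occ.length → p ≤ occ.getD j 0) →
      (pvLowerBound occ p lo hi ≤ occ.length ∧
        (∀ j, j < pvLowerBound occ p lo hi → occ.getD j 0 < p) ∧
        (∀ j, pvLowerBound occ p lo hi ≤ j → j < occ.length → p ≤ occ.getD j 0)) := by
  intro fuel
  induction fuel with
  | zero =>
    intro lo hi hf hle hhi hlo hup
    have : ¬ lo < hi := by omega
    rw [pvLowerBound, dif_neg this]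
    exact ⟨by omega, hlo, fun j hj hjl => hup j (by omega) hjl⟩
  | succ f ih =>
    intro lo hi hf hle hhi hlo hup
    by_cases h : lo < hi
    · rw [pvLowerBound, dif_pos h]
      simp only
      set mid := (lo + hi) / 2 with hmid
      have hm1 : lo ≤ mid := by omega
      have hm2 : mid < hi := by omega
      by_cases hc : occ.getD mid 0 < p
      · rw [if_pos hc]
        refine ih (mid + 1) hi (by omega) (by omega) hhi ?_ hup
        intro j hj
        exact lt_of_le_of_lt (hmono j mid (by omega) (by omega)) hc
      · rw [if_neg hc]
        refine ih lo mid (by omega) (by omega) (by omega) hlo ?_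
        intro j hj hjl
        exact le_trans (not_lt.mp hc) (hmono mid j hj hjl)
    · rw [pvLowerBound, dif_neg h]
      exact ⟨by omega, hlo, fun j hj hjl => hup j (by omega) hjl⟩

lemma occFrom_pairwise (k : String) :
    ∀ (ws : List String) (n : Nat), (occFrom k n ws).Pairwise (· < ·) := by
  intro ws
  induction ws with
  | nil => intro n; simp [occFrom]
  | cons w ws ih =>
    intro n
    by_cases hw : w = k
    · simp only [occFrom, if_pos hw]
      refine List.pairwise_cons.mpr ⟨?_, ih (n + 1)⟩
      intro j hj
      have := occFrom_bounds k ws (n + 1) j hj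
      omega
    · simpa [occFrom, hw] using ih (n + 1)

lemma occFrom_split (k : String) (ws : List String) (n : Nat) :
    occFrom k 0 ws = occFrom k 0 (ws.take n) ++ occFrom k n (ws.drop n) := by
  by_cases h : n ≤ ws.length
  · have := occFrom_append k (ws.take n) (ws.drop n) 0
    rw [List.take_append_drop] at this
    rw [this]
    congr 2
    simp [List.length_take, Nat.min_eq_left h]
  · rw [List.take_of_length_le (by omega), List.drop_of_length_le (by omega)]
    simp [occFrom]

lemma getD_map_ofNat (L : List Nat) (i : Nat) (h : i < L.length) :
    (L.map Int.ofNat).getD i 0 = Int.ofNat (L[i]'h) := by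
  rw [List.getD_eq_getElem _ _ (by simpa using h)]
  simp

lemma map_ofNat_mono (L : List Nat) (hp : L.Pairwise (· < ·)) :
    ∀ a b, a ≤ b → b < (L.map Int.ofNat).length →
      (L.map Int.ofNat).getD a 0 ≤ (L.map Int.ofNat).getD b 0 := by
  intro a b hab hb
  have hb' : b < L.length := by simpa using hb
  have ha' : a < L.length := lt_of_le_of_lt hab hb'
  rw [getD_map_ofNat L a ha', getD_map_ofNat L b hb']
  rcases lt_or_eq_of_le hab with h | h
  · have := (List.pairwise_iff_getElem.mp hp) a b ha' hb' h
    simp only [Int.ofNat_eq_natCast]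
    omega
  · subst h; rfl

-- the binary search on the position list of k finds the end of the block of positions < n

lemma pvLowerBound_split (m1 m2 : List Nat) (n : Nat)
    (hp : (m1 ++ m2).Pairwise (· < ·))
    (hm1lt : ∀ j ∈ m1, j < n) (hm2ge : ∀ j ∈ m2, n ≤ j) :
    pvLowerBound ((m1 ++ m2).map Int.ofNat) (Int.ofNat n) 0 ((m1 ++ m2).map Int.ofNat).length
      = m1.length := by
  set L := m1 ++ m2 with hL
  set occ := L.map Int.ofNat with hocc
  obtain ⟨hrle, hlow, hhigh⟩ := pvLowerBound_spec occ (Int.ofNat n)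
    (map_ofNat_mono L hp) occ.length 0 occ.length (by omega) (by omega) (le_refl _)
    (by intro j hj; omega) (by intro j hj hjl; omega)
  set r := pvLowerBound occ (Int.ofNat n) 0 occ.length with hr
  have hLlen : L.length = occ.length := by simp [hocc]
  have hocclen : occ.length = m1.length + m2.length := by simp [hocc, hL]
  by_contra hne
  rcases lt_or_gt_of_ne hne with hlt | hgt
  · have hrlen : r < occ.length := by omega
    have hhr := hhigh r (le_refl _) hrlen
    rw [getD_map_ofNat L r (hLlen ▸ hrlen)] at hhr
    have hLr : L[r]'(hLlen ▸ hrlen) = m1[r]'hlt := List.getElem_append_left ..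
    have := hm1lt _ (hLr ▸ List.getElem_mem hlt)
    simp only [Int.ofNat_eq_natCast] at hhr
    omega
  · have hm1len : m1.length < occ.length := by omega
    have hlo := hlow m1.length hgt
    rw [getD_map_ofNat L m1.length (hLlen ▸ hm1len)] at hlo
    have hm2len : 0 < m2.length := by omega
    have hLm : L[m1.length]'(hLlen ▸ hm1len) = m2[0]'hm2len := by
      rw [List.getElem_append_right (le_refl m1.length)]
      simp
    have := hm2ge _ (hLm ▸ List.getElem_mem hm2len)
    simp only [Int.ofNat_eq_natCast] at hlo
    omega

lemma getD_map_append_cons (m1 : List Nat) (j : Nat) (t : List Nat) :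
    ((m1 ++ j :: t).map Int.ofNat).getD m1.length 0 = Int.ofNat j := by
  have h : m1.length < (m1 ++ j :: t).length := by simp
  rw [getD_map_ofNat _ _ h]
  congr 1
  rw [List.getElem_append_right (le_refl m1.length)]
  simp

-- B's index walk computes the greedy in-order match on the suffix

lemma pvOrderedB_eq (ws : List String) :
    ∀ (ks : List String) (n : Nat),
      pvOrderedB (pvPositions ws) ks (Int.ofNat n) = pvOrderedAll ks (ws.drop n) := by
  intro ks
  induction ks with
  | nil => intro n; simp [pvOrderedB, pvOrderedAll]
  | cons k ks ih =>
    intro n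
    have hocc : (pvPositions ws).getD k []
        = (occFrom k 0 (ws.take n) ++ occFrom k n (ws.drop n)).map Int.ofNat := by
      have := pvBuild_getD k ws 0 PySem.Dict.empty
      rw [occFrom_split k ws n] at this
      simpa [pvPositions, PySem.Dict.getD_empty] using this
    set m1 := occFrom k 0 (ws.take n) with hm1
    set m2 := occFrom k n (ws.drop n) with hm2
    have hm1lt : ∀ j ∈ m1, j < n := by
      intro j hj
      have := occFrom_bounds k (ws.take n) 0 j hj
      have hlen : (ws.take n).length ≤ n := by simp [List.length_take]
      omega
    have hm2ge : ∀ j ∈ m2, n ≤ j := fun j hj => (occFrom_bounds k (ws.drop n) n j hj).1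
    have hp : (m1 ++ m2).Pairwise (· < ·) := by
      rw [hm1, hm2, ← occFrom_split k ws n]
      exact occFrom_pairwise k ws 0
    have hlb := pvLowerBound_split m1 m2 n hp hm1lt hm2ge
    rcases hm2eq : m2 with _ | ⟨j, t⟩
    · have hconsume : pvConsume k (ws.drop n) = none :=
        (pvConsume_occFrom k (ws.drop n) n).1 (by rw [← hm2, hm2eq])
      rw [pvOrderedB]
      simp only [hocc, hlb]
      rw [if_pos (by simp [hm2eq]), pvOrderedAll, hconsume]
    · obtain ⟨hjge, hconsume⟩ := (pvConsume_occFrom k (ws.drop n) n).2 j t (by rw [← hm2, hm2eq])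
      have hget : ((m1 ++ m2).map Int.ofNat).getD m1.length 0 = Int.ofNat j := by
        rw [hm2eq]; exact getD_map_append_cons m1 j t
      have hdrops : (ws.drop n).drop (j + 1 - n) = ws.drop (j + 1) := by
        rw [List.drop_drop]
        congr 1
        omega
      rw [pvOrderedB]
      simp only [hocc, hlb]
      rw [if_neg (by simp [hm2eq]), pvOrderedAll, hconsume, hdrops, hget]
      have : Int.ofNat j + 1 = Int.ofNat (j + 1) := by simp
      rw [this, ih (j + 1)]


-- characterisation of A's loop (state (keyword_idx, ordered_count, unordered_count))
lemma pvLoopA_char (keywords : List String) :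
    ∀ (ans : List String) (ki uc : Nat), ki ≤ keywords.length →
      let r := ans.foldl (pvStepA keywords) (ki, ki, uc)
      r.1 ≤ keywords.length ∧ r.2.1 = r.1 ∧
      r.2.2 = uc + ans.countP (fun w => decide (w ∈ keywords)) ∧
      ((r.2.1 = keywords.length) ↔ pvOrderedAll (keywords.drop ki) ans = true) := by
  intro ans
  induction ans with
  | nil =>
    intro ki uc hki
    refine ⟨hki, rfl, by simp, ?_⟩
    constructor
    · intro h; subst h; simp [pvOrderedAll, List.drop_length]
    · intro h
      by_contra hne
      have hlt : ki < keywords.length := lt_of_le_of_ne hki hne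
      rw [List.drop_eq_getElem_cons hlt] at h
      simp [pvOrderedAll, pvConsume] at h
  | cons w ws ih =>
    intro ki uc hki
    simp only [List.foldl_cons]
    by_cases hmatch : ki < keywords.length ∧ keywords.getD ki "" = w
    · have hget : keywords[ki]'hmatch.1 = w := by
        have := hmatch.2; rwa [List.getD_eq_getElem keywords "" hmatch.1] at this
      by_cases hin : w ∈ keywords
      · have hstep : pvStepA keywords (ki, ki, uc) w = (ki + 1, ki + 1, uc + 1) := by
          simp [pvStepA, hmatch, hin, hget]
        rw [hstep]
        obtain ⟨h1, h2, h3, h4⟩ := ih (ki + 1) (uc + 1) hmatch.1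
        refine ⟨h1, h2, by simp [h3, hin]; omega, ?_⟩
        rw [h4, List.drop_eq_getElem_cons hmatch.1]
        simp [pvOrderedAll, pvConsume, hget]
      · exact absurd (hget ▸ List.getElem_mem hmatch.1) hin
    · have hstep1 : (if ki < keywords.length ∧ keywords.getD ki "" = w
            then ((ki : Nat) + 1, ki + 1, uc) else ((ki : Nat), ki, uc)) = (ki, ki, uc) := by
        rw [if_neg hmatch]
      by_cases hin : w ∈ keywords
      · have hstep : pvStepA keywords (ki, ki, uc) w = (ki, ki, uc + 1) := by
          simp only [pvStepA, hstep1, hin, if_pos]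
        rw [hstep]
        obtain ⟨h1, h2, h3, h4⟩ := ih ki (uc + 1) hki
        refine ⟨h1, h2, by simp [h3, hin]; omega, ?_⟩
        rw [h4]
        rcases lt_or_eq_of_le hki with hlt | heq
        · have hne : keywords[ki]'hlt ≠ w := by
            intro h; exact hmatch ⟨hlt, by rw [List.getD_eq_getElem keywords "" hlt, h]⟩
          rw [List.drop_eq_getElem_cons hlt]
          have hne' : ¬ (w = keywords[ki]'hlt) := fun h => hne (Eq.symm h)
          simp only [pvOrderedAll, pvConsume]
          rw [if_neg hne']
        · subst heq; simp [List.drop_length, pvOrderedAll]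
      · have hstep : pvStepA keywords (ki, ki, uc) w = (ki, ki, uc) := by
          simp only [pvStepA, hstep1, hin, if_neg, not_false_iff]
        rw [hstep]
        obtain ⟨h1, h2, h3, h4⟩ := ih ki uc hki
        refine ⟨h1, h2, by simp [h3, hin], ?_⟩
        rw [h4]
        rcases lt_or_eq_of_le hki with hlt | heq
        · have hne : keywords[ki]'hlt ≠ w := by
            intro h; rw [← h] at hin; exact hin (List.getElem_mem hlt)
          rw [List.drop_eq_getElem_cons hlt]
          have hne' : ¬ (w = keywords[ki]'hlt) := fun h => hne (Eq.symm h)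
          simp only [pvOrderedAll, pvConsume]
          rw [if_neg hne']
        · subst heq; simp [List.drop_length, pvOrderedAll]

-- ===== VERDICT (by name: the statement is the Claim_ definition above) =====
theorem choose_criteria_spec : Claim_equal_choose_criteria := by
  intro keywords answered_words _
  unfold Spec_choose_criteria choose_criteria choose_criteria_alt pvClassifyA
  obtain ⟨_, _, h3, h4⟩ := pvLoopA_char keywords answered_words 0 0 (Nat.zero_le _)
  simp only [List.drop_zero] at h4
  simp only [Nat.zero_add] at h3
  have hOB : pvOrderedB (pvPositions answered_words) keywords 0 =
      pvOrderedAll keywords answered_words := by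
    have := pvOrderedB_eq answered_words keywords 0
    simpa [Int.ofNat_eq_natCast] using this
  have hcnt : answered_words.countP (fun w => PySem.Set.contains (PySem.Set.ofList keywords) w)
      = answered_words.countP (fun w => decide (w ∈ keywords)) := by
    apply List.countP_congr
    intro w _
    simp [PySem.Set.mem_ofList]
  rw [h3]
  by_cases hord : pvOrderedAll keywords answered_words = true
  · rw [if_pos (h4.mpr hord)]
    simp only [hOB, hord, if_pos]
  · rw [if_neg (fun h => hord (h4.mp h))]
    have : pvOrderedB (pvPositions answered_words) keywords 0 = false := by
      rw [hOB]; exact Bool.not_eq_true _ ▸ (by simpa using hord)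
    simp only [this, Bool.false_eq_true, if_false, hcnt]
    by_cases hc : 1 < answered_words.countP (fun w => decide (w ∈ keywords))
    · rw [if_pos hc, if_pos hc]
    · rw [if_neg hc, if_neg hc]
      by_cases hne : answered_words = []
      · subst hne; simp
      · rw [if_pos (by simpa [List.length_eq_zero_iff] using hne), if_pos hne]
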